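-- pv_equiv track=rewrite | github.com/boxsitter/satellite-signal-decoding-lesson | student_decoder.py | apply_false_color
-- ===== SOURCE A (Python) =====
-- FALSE_COLOR_RULES = [
--     (40, (5, 10, 30)),      # very dark -> deep blue
--     (90, (20, 60, 120)),    # darker -> blue
--     (140, (30, 110, 60)),   # mid -> green
--     (200, (180, 160, 70)),  # bright -> yellow-ish
--     (255, (240, 240, 240)), # very bright -> near white
-- ]
--
-- def color_for_value(value):
--     """Map one grayscale value (0..255) to an (R,G,B) color."""
--     for max_value, rgb in FALSE_COLOR_RULES:
--         if value <= max_value: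
--             return rgb
--     return (255, 255, 255)
--
-- def apply_false_color(pixels_2d):
--     """Turn a grayscale 2D image into a color (RGB) 3D image."""
--     colored = []
--     for row in pixels_2d:
--         new_row = []
--         for value in row:
--             new_row.append(list(color_for_value(value)))
--         colored.append(new_row)
--     return colored
-- ===== SOURCE B (Python) =====
-- _THRESHOLDS = [40, 90, 140, 200, 255]
-- _COLORS = [(5, 10, 30), (20, 60, 120), (30, 110, 60), (180, 160, 70), (240, 240, 240)]
--
--
-- def _rule_index(value):
--     """First index i with value <= _THRESHOLDS[i], found by binary search."""
--     lo, hi = 0, len(_THRESHOLDS)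
--     while lo < hi:
--         mid = (lo + hi) // 2
--         if _THRESHOLDS[mid] < value:
--             lo = mid + 1
--         else:
--             hi = mid
--     return lo
--
--
-- def _color(value):
--     i = _rule_index(value)
--     return list(_COLORS[i]) if i < len(_COLORS) else [255, 255, 255]
--
--
-- def apply_false_color(pixels_2d):
--     """Turn a grayscale 2D image into a color (RGB) 3D image."""
--     return [[_color(value) for value in row] for row in pixels_2d]
-- ===== Notes on version B (the rewrite author's own statement) =====
-- stated objective: alternative
-- what changed: B replaces the per-pixel linear scan of the threshold rule list by a hand-written binary search for the first threshold >= value, and builds the image with nested comprehensions instead of append loops.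
import Mathlib
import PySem

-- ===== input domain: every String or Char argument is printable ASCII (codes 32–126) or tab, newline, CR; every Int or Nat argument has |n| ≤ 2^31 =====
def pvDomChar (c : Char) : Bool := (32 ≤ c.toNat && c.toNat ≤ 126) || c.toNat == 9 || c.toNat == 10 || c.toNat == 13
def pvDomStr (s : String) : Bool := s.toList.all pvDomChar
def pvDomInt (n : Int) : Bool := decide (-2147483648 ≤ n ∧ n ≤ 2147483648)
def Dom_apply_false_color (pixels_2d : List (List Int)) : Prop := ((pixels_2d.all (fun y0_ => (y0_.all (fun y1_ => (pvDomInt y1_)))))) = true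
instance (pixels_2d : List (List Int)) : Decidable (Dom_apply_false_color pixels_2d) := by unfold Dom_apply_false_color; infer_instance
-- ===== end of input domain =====

-- B finds the matching rule by binary search over the thresholds instead of A's linear rule-list scan (objective: alternative).

-- ===== PORT A =====
def FALSE_COLOR_RULES : List (Int × (Int × Int × Int)) :=
  [(40, (5, 10, 30)), (90, (20, 60, 120)), (140, (30, 110, 60)),
   (200, (180, 160, 70)), (255, (240, 240, 240))]

-- the 'for max_value, rgb in FALSE_COLOR_RULES' loop with early return
def colorLoop (value : Int) : List (Int × (Int × Int × Int)) → Int × Int × Int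
  | [] => (255, 255, 255)
  | (max_value, rgb) :: rest => if value ≤ max_value then rgb else colorLoop value rest

def color_for_value (value : Int) : Int × Int × Int :=
  colorLoop value FALSE_COLOR_RULES

def apply_false_color (pixels_2d : List (List Int)) : List (List (List Int)) :=
  pixels_2d.foldl (fun colored row =>
    colored ++ [row.foldl (fun new_row value =>
      new_row ++ [match color_for_value value with | (r, g, b) => [r, g, b]]) []]) []

-- ===== PORT B =====
def bTHRESHOLDS : List Int := [40, 90, 140, 200, 255]
def bCOLORS : List (List Int) := [[5, 10, 30], [20, 60, 120], [30, 110, 60], [180, 160, 70], [240, 240, 240]]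

-- the 'while lo < hi' binary-search loop of _rule_index; fuel 5 bounds the ≤3 halving steps
def bSearch (value : Int) (lo hi : Nat) : Nat → Nat
  | 0 => lo
  | fuel + 1 =>
    if lo < hi then
      let mid := (lo + hi) / 2
      if (bTHRESHOLDS.getD mid 0) < value then bSearch value (mid + 1) hi fuel
      else bSearch value lo mid fuel
    else lo

def bRuleIndex (value : Int) : Nat := bSearch value 0 5 5

def bColor (value : Int) : List Int :=
  let i := bRuleIndex value
  if i < 5 then bCOLORS.getD i [] else [255, 255, 255]

def apply_false_color_alt (pixels_2d : List (List Int)) : List (List (List Int)) :=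
  pixels_2d.map (fun row => row.map (fun value => bColor value))

-- ===== PRECONDITION & SPEC =====
def Spec_apply_false_color (pixels_2d : List (List Int)) (out : List (List (List Int))) : Prop := out = apply_false_color_alt pixels_2d
instance (pixels_2d : List (List Int)) (out : List (List (List Int))) : Decidable (Spec_apply_false_color pixels_2d out) := by unfold Spec_apply_false_color; infer_instance

-- ===== CLAIM =====
def Claim_equal_apply_false_color : Prop := ∀ (pixels_2d : List (List Int)), Dom_apply_false_color pixels_2d → Spec_apply_false_color pixels_2d (apply_false_color pixels_2d)

-- ===== LEMMAS AND PROOFS =====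

theorem foldl_append_map {α β : Type} (f : α → β) (xs : List α) (acc : List β) :
    xs.foldl (fun a x => a ++ [f x]) acc = acc ++ xs.map f := by
  induction xs generalizing acc with
  | nil => simp
  | cons x xs ih => simp [List.foldl, ih]

-- the per-pixel value computed by port A
def aPix (v : Int) : List Int :=
  match color_for_value v with | (r, g, b) => [r, g, b]

set_option maxRecDepth 4000 in
theorem pix_small : ∀ n : Fin 256, bColor (n : Int) = aPix (n : Int) := by decide

theorem pix_eq (v : Int) : bColor v = aPix v := by
  rcases lt_or_ge v 0 with h | h
  · have h1 : bColor v = [5, 10, 30] := by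
      simp [bColor, bRuleIndex, bSearch, bTHRESHOLDS,
        show ¬ (140 : Int) < v from by omega, show ¬ (90 : Int) < v from by omega,
        show ¬ (40 : Int) < v from by omega, bCOLORS]
    have h2 : aPix v = [5, 10, 30] := by
      simp [aPix, color_for_value, FALSE_COLOR_RULES, colorLoop,
        show v ≤ (40 : Int) from by omega]
    rw [h1, h2]
  · rcases le_or_gt v 255 with h2 | h2
    · have hv : v = ((v.toNat : Nat) : Int) := by omega
      have hlt : v.toNat < 256 := by omega
      rw [hv]
      exact pix_small ⟨v.toNat, hlt⟩
    · have h1 : bColor v = [255, 255, 255] := by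
        simp [bColor, bRuleIndex, bSearch, bTHRESHOLDS,
          show (140 : Int) < v from by omega,
          show (255 : Int) < v from by omega]
      have h2 : aPix v = [255, 255, 255] := by
        simp [aPix, color_for_value, FALSE_COLOR_RULES, colorLoop,
          show ¬ v ≤ (40 : Int) from by omega, show ¬ v ≤ (90 : Int) from by omega,
          show ¬ v ≤ (140 : Int) from by omega, show ¬ v ≤ (200 : Int) from by omega,
          show ¬ v ≤ (255 : Int) from by omega]
      rw [h1, h2]

-- ===== VERDICT =====
theorem apply_false_color_spec : Claim_equal_apply_false_color := by
  intro pixels _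
  unfold Spec_apply_false_color apply_false_color apply_false_color_alt
  have houter := foldl_append_map (f := fun row : List Int =>
        row.foldl (fun new_row value =>
          new_row ++ [match color_for_value value with | (r, g, b) => [r, g, b]]) []) pixels []
  rw [houter]
  simp only [List.nil_append]
  apply List.map_congr_left
  intro row _
  have hinner := foldl_append_map (f := fun value : Int =>
        match color_for_value value with | (r, g, b) => [r, g, b]) row []
  rw [hinner]
  simp only [List.nil_append]
  apply List.map_congr_left
  intro v _
  exact (pix_eq v).symm
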